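-- pv_equiv track=rewrite | github.com/danielfinsper/EP-2-dsoft | funcoes.py | calcula_pontos_sequencia_baixa
-- ===== SOURCE A (Python) =====
-- def calcula_pontos_sequencia_baixa(lista):
--     tem_1 = False
--     tem_2 = False
--     tem_3 = False
--     tem_4 = False
--     for numero in lista:
--         if numero == 1:
--             tem_1 = True
--         elif numero == 2:
--             tem_2 = True
--         elif numero == 3:
--             tem_3 = True
--         elif numero == 4:
--             tem_4 = True
--     if tem_1 and tem_2 and tem_3 and tem_4:
--         return 15
--     else:
--         return 0
-- ===== SOURCE B (Python) =====
-- def calcula_pontos_sequencia_baixa(lista):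
--     return 15 if all(n in lista for n in (1, 2, 3, 4)) else 0
-- ===== Notes on version B (the rewrite author's own statement) =====
-- stated objective: idiomatic
-- what changed: Replaced the single-pass loop maintaining four boolean flags by four membership tests (`n in lista` for n in 1..4) combined with all().
import Mathlib
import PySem

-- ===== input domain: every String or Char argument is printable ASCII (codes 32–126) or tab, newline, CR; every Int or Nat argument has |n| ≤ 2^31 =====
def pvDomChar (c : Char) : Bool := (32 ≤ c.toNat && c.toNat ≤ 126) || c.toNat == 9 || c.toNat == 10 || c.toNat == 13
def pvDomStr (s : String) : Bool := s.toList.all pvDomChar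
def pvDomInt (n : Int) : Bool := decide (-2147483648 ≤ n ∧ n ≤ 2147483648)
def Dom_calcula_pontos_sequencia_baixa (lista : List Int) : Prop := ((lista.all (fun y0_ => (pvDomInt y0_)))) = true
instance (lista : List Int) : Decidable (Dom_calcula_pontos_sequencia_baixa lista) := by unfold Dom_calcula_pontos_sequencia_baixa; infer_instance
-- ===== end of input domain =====

-- ===== PORT A =====
-- B replaces A's single-pass four-flag loop by four membership tests combined with all() (idiomatic, same cost).
def calcula_pontos_sequencia_baixa (lista : List Int) : Int :=
  let s : Bool × Bool × Bool × Bool :=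
    lista.foldl (fun (t : Bool × Bool × Bool × Bool) numero =>
      if numero = 1 then (true, t.2.1, t.2.2.1, t.2.2.2)
      else if numero = 2 then (t.1, true, t.2.2.1, t.2.2.2)
      else if numero = 3 then (t.1, t.2.1, true, t.2.2.2)
      else if numero = 4 then (t.1, t.2.1, t.2.2.1, true)
      else t) (false, false, false, false)
  if s.1 && s.2.1 && s.2.2.1 && s.2.2.2 then 15 else 0

-- ===== PORT B =====
def calcula_pontos_sequencia_baixa_alt (lista : List Int) : Int :=
  if ([1, 2, 3, 4] : List Int).all (fun n => lista.contains n) then 15 else 0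

-- ===== PRECONDITION & SPEC =====
def Spec_calcula_pontos_sequencia_baixa (lista : List Int) (out : Int) : Prop := out = calcula_pontos_sequencia_baixa_alt lista
instance (lista : List Int) (out : Int) : Decidable (Spec_calcula_pontos_sequencia_baixa lista out) := by unfold Spec_calcula_pontos_sequencia_baixa; infer_instance

-- ===== CLAIM (what is proved, stated in full; the proofs are below) =====
def Claim_equal_calcula_pontos_sequencia_baixa : Prop := ∀ (lista : List Int), Dom_calcula_pontos_sequencia_baixa lista → Spec_calcula_pontos_sequencia_baixa lista (calcula_pontos_sequencia_baixa lista)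

-- ===== LEMMAS AND PROOFS =====
theorem pv_flags_fold (lista : List Int) (a b c d : Bool) :
    lista.foldl (fun (t : Bool × Bool × Bool × Bool) numero =>
      if numero = 1 then (true, t.2.1, t.2.2.1, t.2.2.2)
      else if numero = 2 then (t.1, true, t.2.2.1, t.2.2.2)
      else if numero = 3 then (t.1, t.2.1, true, t.2.2.2)
      else if numero = 4 then (t.1, t.2.1, t.2.2.1, true)
      else t) (a, b, c, d)
    = (a || lista.contains 1, b || lista.contains 2,
       c || lista.contains 3, d || lista.contains 4) := by
  induction lista generalizing a b c d with
  | nil => simp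
  | cons x xs ih =>
    simp only [List.foldl_cons, List.contains_cons]
    by_cases h1 : x = 1
    · subst h1; simp [ih]
    · by_cases h2 : x = 2
      · subst h2; simp [ih]
      · by_cases h3 : x = 3
        · subst h3; simp [ih]
        · by_cases h4 : x = 4
          · subst h4; simp [ih]
          · have e1 : ((1 : Int) == x) = false := by rw [beq_eq_false_iff_ne]; exact Ne.symm h1
            have e2 : ((2 : Int) == x) = false := by rw [beq_eq_false_iff_ne]; exact Ne.symm h2
            have e3 : ((3 : Int) == x) = false := by rw [beq_eq_false_iff_ne]; exact Ne.symm h3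
            have e4 : ((4 : Int) == x) = false := by rw [beq_eq_false_iff_ne]; exact Ne.symm h4
            simp [ih, h1, h2, h3, h4, e1, e2, e3, e4]

-- ===== VERDICT (by name: the statement is the Claim_ definition above) =====
theorem calcula_pontos_sequencia_baixa_spec : Claim_equal_calcula_pontos_sequencia_baixa := by
  intro lista _
  unfold Spec_calcula_pontos_sequencia_baixa calcula_pontos_sequencia_baixa calcula_pontos_sequencia_baixa_alt
  simp [pv_flags_fold, List.all, Bool.and_comm, Bool.and_assoc,]
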